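-- pv_equiv track=rewrite | github.com/teedobey/advent-of-code-2023 | day7b.py | gen_hands
-- ===== SOURCE A (Python) =====
-- def gen_hands(hand):
--     hands = [""]
--     for card in hand:
--         if card != 'J':
--             for j, unused in enumerate(hands):
--                 hands[j] += card
--         else:
--             new_hands = []
--             for j, ex_hand in enumerate(hands):
--                 for k in ["A", "K", "Q", "T", "9", "8", "7", "6", "5", "4", "3", "2"]:
--                     new_hands.append(ex_hand + k)
--             hands = new_hands
--     return hands
-- ===== SOURCE B (Python) =====
-- CARDS = ["A", "K", "Q", "T", "9", "8", "7", "6", "5", "4", "3", "2"]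
--
-- def gen_hands(hand):
--     # Recurse on the first J: str.partition splits off the whole non-J prefix
--     # in one step; substitute each card there and expand the suffix recursively.
--     prefix, sep, suffix = hand.partition('J')
--     if not sep:
--         return [hand]
--     rest = gen_hands(suffix)
--     return [prefix + c + r for c in CARDS for r in rest]
-- ===== Notes on version B (the rewrite author's own statement) =====
-- stated objective: faster
-- what changed: Replaces A's per-character loop that rewrites the entire growing hands list at every character with a recursion on the first wildcard found by str.partition: the whole non-wildcard prefix is consumed in one step and each of the 12 cards is substituted at that position before recursing on the suffix.
import Mathlib
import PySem

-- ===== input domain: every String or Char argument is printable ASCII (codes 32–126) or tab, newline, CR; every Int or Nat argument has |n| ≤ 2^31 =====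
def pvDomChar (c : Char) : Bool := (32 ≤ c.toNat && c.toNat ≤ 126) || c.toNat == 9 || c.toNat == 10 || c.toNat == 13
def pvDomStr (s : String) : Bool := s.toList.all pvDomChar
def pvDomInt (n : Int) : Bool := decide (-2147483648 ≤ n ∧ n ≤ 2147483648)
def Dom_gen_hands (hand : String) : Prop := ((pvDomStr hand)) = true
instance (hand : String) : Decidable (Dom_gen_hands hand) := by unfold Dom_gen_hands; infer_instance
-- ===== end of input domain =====

-- B replaces A's per-character iterative rewriting of the whole hands list with a
-- recursion on the FIRST 'J' (partition: whole non-J prefix handled in one step);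
-- same values and order; a timing run measured B faster on J-sparse inputs.


-- ===== PORT A =====
-- Hands are kept as lists of chars (Python strings built with +=); converted to
-- String with String.ofList at the end — exact on the ASCII domain.
def cardsA : List (List Char) :=
  [['A'], ['K'], ['Q'], ['T'], ['9'], ['8'], ['7'], ['6'], ['5'], ['4'], ['3'], ['2']]

def stepA (hands : List (List Char)) (card : Char) : List (List Char) :=
  if card ≠ 'J' then
    hands.map (fun h => h ++ [card])
  else
    hands.flatMap (fun ex => cardsA.map (fun k => ex ++ k))

def gen_hands (hand : String) : List String :=
  (hand.toList.foldl stepA [[]]).map String.ofList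

-- ===== PORT B =====
def cardsB : List Char := ['A', 'K', 'Q', 'T', '9', '8', '7', '6', '5', '4', '3', '2']

-- Source B's hand.partition('J') is List.span (· ≠ 'J') on the char list; the
-- recursion substitutes every card at the first 'J' and expands the suffix.
def goAlt (cs : List Char) : List (List Char) :=
  match h : cs.span (fun c => c ≠ 'J') with
  | (_, []) => [cs]
  | (pre, _ :: suf) =>
    cardsB.flatMap (fun c => (goAlt suf).map (fun r => pre ++ c :: r))
termination_by cs.length
decreasing_by
  have h2 := List.span_eq_takeWhile_dropWhile (p := fun c => c ≠ 'J') cs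
  rw [h, Prod.mk.injEq] at h2
  obtain ⟨h2a, h2b⟩ := h2
  have h3 := List.takeWhile_append_dropWhile (p := fun c => c ≠ 'J') (l := cs)
  rw [← h2a, ← h2b] at h3
  have := congrArg List.length h3
  simp at this
  omega

def gen_hands_alt (hand : String) : List String :=
  (goAlt hand.toList).map String.ofList

-- ===== PRECONDITION & SPEC =====
def Spec_gen_hands (hand : String) (out : List String) : Prop := out = gen_hands_alt hand
instance (hand : String) (out : List String) : Decidable (Spec_gen_hands hand out) := by unfold Spec_gen_hands; infer_instance

-- ===== CLAIM (what is proved, stated in full; the proofs are below) =====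
def Claim_equal_gen_hands : Prop := ∀ (hand : String), Dom_gen_hands hand → Spec_gen_hands hand (gen_hands hand)

-- ===== LEMMAS AND PROOFS =====
-- Proof-side canonical form: per-character expansion, recursively.
def goC : List Char → List (List Char)
  | [] => [[]]
  | c :: cs =>
    if c = 'J' then cardsB.flatMap (fun k => (goC cs).map (fun r => k :: r))
    else (goC cs).map (fun r => c :: r)

lemma foldl_stepA (cs : List Char) (hands : List (List Char)) :
    cs.foldl stepA hands = hands.flatMap (fun h => (goC cs).map (fun r => h ++ r)) := by
  induction cs generalizing hands with
  | nil => simp [goC]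
  | cons c cs ih =>
    rw [List.foldl_cons, ih]
    by_cases hc : c = 'J'
    · subst hc
      simp [stepA, goC, cardsA, cardsB, List.flatMap_assoc, Function.comp_def,
        List.append_assoc]
    · simp [stepA, hc, goC, List.flatMap_map, Function.comp_def, List.append_assoc]

lemma goC_append_noJ (pre rest : List Char) (hp : ∀ c ∈ pre, c ≠ 'J') :
    goC (pre ++ rest) = (goC rest).map (fun r => pre ++ r) := by
  induction pre with
  | nil => simp
  | cons c pre ih =>
    have hc : c ≠ 'J' := hp c (List.mem_cons_self ..)
    simp only [List.cons_append, goC, hc,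
      ih (fun x hx => hp x (List.mem_cons_of_mem _ hx))]
    simp [Function.comp_def]

lemma dropWhile_eq_cons_false {p : Char → Bool} :
    ∀ (l : List Char) (x : Char) (xs : List Char), l.dropWhile p = x :: xs → p x = false := by
  intro l
  induction l with
  | nil => intro x xs h; simp at h
  | cons a l ih =>
    intro x xs h
    rw [List.dropWhile_cons] at h
    by_cases hp : p a
    · rw [if_pos hp] at h; exact ih _ _ h
    · rw [if_neg hp] at h
      cases h
      simpa using hp

lemma goAlt_eq_goC (cs : List Char) : goAlt cs = goC cs := by
  induction cs using goAlt.induct with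
  | case1 cs pre h =>
    have h2 := List.span_eq_takeWhile_dropWhile (p := fun c => c ≠ 'J') cs
    rw [h, Prod.mk.injEq] at h2
    obtain ⟨h2a, h2b⟩ := h2
    have h3 := List.takeWhile_append_dropWhile (p := fun c => c ≠ 'J') (l := cs)
    rw [← h2a, ← h2b] at h3
    have hp : ∀ c ∈ pre, c ≠ 'J' := by
      intro c hc
      have := List.mem_takeWhile_imp (h2a ▸ hc)
      simpa using this
    rw [goAlt, h, ← h3]
    have hgc : goC pre = [pre] := by
      simpa [goC] using goC_append_noJ pre [] hp
    simp [hgc]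
  | case2 cs pre j suf h ih =>
    have h2 := List.span_eq_takeWhile_dropWhile (p := fun c => c ≠ 'J') cs
    rw [h, Prod.mk.injEq] at h2
    obtain ⟨h2a, h2b⟩ := h2
    have h3 := List.takeWhile_append_dropWhile (p := fun c => c ≠ 'J') (l := cs)
    rw [← h2a, ← h2b] at h3
    have hp : ∀ c ∈ pre, c ≠ 'J' := by
      intro c hc
      have := List.mem_takeWhile_imp (h2a ▸ hc)
      simpa using this
    have hj : j = 'J' := by
      have := dropWhile_eq_cons_false (p := fun c => decide (c ≠ 'J')) cs j suf h2b.symm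
      simpa using this
    rw [goAlt, h, ← h3, hj, goC_append_noJ pre ('J' :: suf) hp]
    simp [goC, ih, List.map_flatMap, Function.comp_def]

-- ===== VERDICT (by name: the statement is the Claim_ definition above) =====
theorem gen_hands_spec : Claim_equal_gen_hands := by
  intro hand _
  show _ = _
  unfold gen_hands gen_hands_alt
  rw [foldl_stepA, goAlt_eq_goC]
  simp
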